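/- GENERATED by mk_final_copies.py from the proof of the farm's unit `codebook_decode_deinterleave_repeat.2a` (farm:codebook_decode_deinterleave_repeat.2a.1: Proof.lean) as the
   re-elaboration sweep compiled it — do not edit. -/
import Asan.CheckWalk
import Vorbis.Spec.Units.codebook_decode_deinterleave_repeat_2a

open X86 X86.User Asan Vorbis Vorbis.Spec Vorbis.Spec.Deint

set_option maxRecDepth 4000
set_option maxHeartbeats 4000000

/-- **Segment .2a of `codebook_decode_deinterleave_repeat`: 10DE09H (the loop test) … 10DE32H** (C line 1901
`while (total_decode > 0)`, then line 1903 `if (f->valid_bits < 10) prep_huffman(f)`): from the head's assertion to the store-back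
(`total_decode ≤ 0`, cut10, `AtStore`) or to the join 10DE32H with the loop invariant kept and `total_decode ≥ 1` (`At2b`). One check
site (load4 `f->valid_bits`, 10DE20H), one call (prep_huffman, 10DC43H: `ReaderPre.again` over the push of the return address).
The geometry is `DeintGeo.of_pre` (the precondition + the stack room of `Mid.atEntry`); every exit ends with `Common.carry_seg2`
over `Mem.SameExcept (Seg2Wins …)` chained from the entry; the slots `[rsp+8]`, `[rsp+78H]` are read through the callee by
`seg2_read_slot` / `seg2_read_arg`. -/
theorem Vorbis.Spec.Worked.codebook_decode_deinterleave_repeat_2a_ok : Vorbis.Spec.codebook_decode_deinterleave_repeat_2a.Statement := by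
  intro Lay hLay μ hμ u₀ hcode h_prep h_load4 others frames Blk len ret e u ci pi eff td hat
  obtain ⟨hrip, hcom, hloc, hinv⟩ := hat
  have hcom' := hcom
  obtain ⟨hmid, hpre, hreader, hcb, hapart, hbook, htype2, hc, chSlot, outsSlot, fSlot, cpSlot, ppSlot, lenSlot, htable, hcInt,
    hpInt⟩ := hcom'
  obtain ⟨he, hrsp, hra, h15, h14, h13, h12, hbp, hbx, hsame, hcodeok, habi, hun⟩ := hmid
  obtain ⟨ciReg, piSlot, effReg, tdSlot⟩ := hloc
  v_entry he
  have g : DeintGeo e := DeintGeo.of_pre hpre he_room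
  have hdf := habi.1
  have hmx := habi.2
  have hsse := Vorbis.sseOK_of_abiInv habi
  have w_eq : Mem.EqOn Vorbis.L.textLo Vorbis.L.textHi u₀.mem u.mem := hcodeok
  have hprep := h_prep others frames Blk len
  have gf1 := g.f_st
  have gf2 := g.f_lo
  have gf3 := g.f_hi
  simp only [fOf] at gf1 gf2 gf3
  u_walk hcode [hμ.vendor] until [Vorbis.L.codebook_decode_deinterleave_repeat.cut10,
    Vorbis.L.codebook_decode_deinterleave_repeat.at_10de32] span [Vorbis.L.textLo, Vorbis.L.textHi] side (v_side)
  case check_10de20 =>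
    -- 10DE20H: load4 f->valid_bits
    have hun1 : ShadowUntouched u.mem s_10de20.mem := by v_untouched
    have hun2 : ShadowUntouched e.mem s_10de20.mem := hun.trans hun1
    refine hpre.book.reader.env.obj.accSmall hpre.args hun2 _ 4 (by decide) (by u_omega) ?_
    simp only [Vorbis.Off.sizeof.stb_vorbis]
    u_omega
  case call_inv =>
    v_inv
  case pre_10dc43 =>
    -- 10DC43H: prep_huffman(f)
    have hun1 : ShadowUntouched u.mem s_10dc43.mem := by v_untouched
    have hun2 : ShadowUntouched e.mem s_10dc43.mem := hun.trans hun1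
    have hsh : ShadowPre others frames s_10dc43 :=
      hpre.book.reader.shadow.callee hun2 (by u_omega) (by u_omega) (by u_omega)
    have hb : Bits Blk len u.mem (e.reg .rdi).toNat := hreader.bits
    have hk := Vorbis.Spec.Reader.store_off_obj hb (e.reg .rsp - 112) 8 1104968 (by u_omega) (by u_omega)
    rw [← w_mem] at hk
    exact hpre.book.reader.again hsh w_rdi hk.1.bits
  · -- 10DF30H (cut10): `total_decode ≤ 0`, the store-back; nothing was written
    have hs : Mem.SameExcept (Seg2Wins (e.reg .rsp).toNat (fOf e)) u.mem s_10de0e.mem := by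
      rw [w_mem]
      exact Mem.SameExcept.refl _ _
    have hab : abiInv s_10de0e := by
      refine Vorbis.abiInv_of ?_ ?_
      · rw [w_flags]
        simp only [X86.User.df_setStatus]
        exact hdf
      · rw [w_mxcsr]
        exact hmx
    refine ReachVia.done (Or.inl ⟨w_rip, ?_, ?_, ?_, hinv.inter⟩)
    · refine Common.carry_seg2 hcom g hs ((w_kept .rsp rfl).trans hrsp) ((w_kept .r12 rfl).trans hc) ?_ ?_ hab
      · rw [w_mem]
        exact fSlot
      · rw [w_mem]
        exact hreader
    · exact (w_kept .rbp rfl).trans ciReg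
    · rw [w_mem]
      exact piSlot
  · -- 10DC48H: prep_huffman has returned; `jmp 10de32`
    v_after_call w_rsp_10dc43 w_mem_10dc43
    simp only [w_rdi_10dc43] at w_same
    have hp1 : UInt64.ofNat (s_10dc43.mem.readLE (e.reg .rsp - 80) 8) = e.reg .rdi := by u_resolve
    have hs1 : UInt64.ofNat (s_10dc43r.mem.readLE (e.reg .rsp - 80) 8) = e.reg .rdi := by
      have r : s_10dc43r.mem.readLE (e.reg .rsp - 80) 8 =
          (u.mem.writeLE (e.reg .rsp - 112) 8 1104968).readLE (e.reg .rsp - 80) 8 := by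
        apply w_same.readLE
        · u_omega
        · simp only [List.forall_mem_cons, List.not_mem_nil, false_imp_iff, implies_true, and_true]
          repeat' apply And.intro
          all_goals u_omega
      rw [r, ← w_mem_10dc43]
      exact hp1
    have htd : 1 ≤ td := by
      have hlt : u.mem.readLE (e.reg .rsp + 16) 4 < 2 ^ 32 := Mem.readLE_lt' _ _ _
      rw [Vorbis.toInt_ofNat32 _ hlt, tdSlot] at hbr_10de0e
      have e0 : (0#32).toInt = 0 := by decide
      omega
    -- the footprint since the head: the push of the return address, then the callee's windows
    have hpush : Mem.SameExcept (Seg2Wins (e.reg .rsp).toNat (fOf e)) u.mem (u.mem.writeLE (e.reg .rsp - 112) 8 1104968) := by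
      unfold Seg2Wins
      exact Mem.SameExcept.writeLE _ _ _ _ _ (by u_omega) ⟨_, List.mem_cons_self, by u_omega, by u_omega⟩
    have hs : Mem.SameExcept (Seg2Wins (e.reg .rsp).toNat (fOf e)) u.mem s_10dc43r.mem := by
      refine Vorbis.Spec.Reader.sameExcept_through_callee hpush w_same ?_
      unfold Seg2Wins
      simp only [fOf, List.forall_mem_cons, List.not_mem_nil, false_imp_iff, implies_true, and_true, X86.User.inSpans_cons,
        X86.User.inSpans_nil, or_false]
      repeat' apply And.intro
      all_goals u_omega
    -- `Bits` and μ: the head's, over the push, then the callee's post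
    have hpost : PrepHuffmanPost Blk len (s_10dc43.reg .rdi).toNat s_10dc43 s_10dc43r := w_post
    rw [w_rdi_10dc43] at hpost
    have hb : Bits Blk len u.mem (e.reg .rdi).toNat := hreader.bits
    have hk := Vorbis.Spec.Reader.store_off_obj hb (e.reg .rsp - 112) 8 1104968 (by u_omega) (by u_omega)
    rw [← w_mem_10dc43] at hk
    have hrd : ReaderPost Blk len e.mem s_10dc43r.mem (fOf e) := (hreader.trans hk.1).trans hpost.reader
    have hpi : s_10dc43r.mem.readLE (e.reg .rsp - 96) 4 = pi := by
      have r : s_10dc43r.mem.readLE (e.reg .rsp - 96) 4 = u.mem.readLE (e.reg .rsp - 96) 4 :=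
        seg2_read_slot g hs 96 4 (by omega)
      rw [r]
      exact piSlot
    have htds : sint32 (s_10dc43r.mem.readLE (e.reg .rsp + 16) 4) = td := by
      have r : s_10dc43r.mem.readLE (e.reg .rsp + 16) 4 = u.mem.readLE (e.reg .rsp + 16) 4 :=
        seg2_read_arg g hs 16 4 (by omega)
      rw [r]
      exact tdSlot
    clear w_same hpush
    u_walk hcode [hμ.vendor] until [Vorbis.L.codebook_decode_deinterleave_repeat.at_10de32]
      span [Vorbis.L.textLo, Vorbis.L.textHi] side (v_side)
    have hab : abiInv s_10dc48 := by
      refine Vorbis.abiInv_of ?_ ?_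
      · rw [w_flags]
        exact w_df
      · rw [w_mxcsr]
        exact w_mx
    rw [← w_mem] at hs hrd hs1 hpi htds
    refine ReachVia.done (Or.inr ⟨w_rip, ?_, ⟨?_, hpi, ?_, htds⟩, hinv, htd⟩)
    · exact Common.carry_seg2 hcom g hs w_rsp ((w_kept .r12 rfl).trans hc) hs1 hrd hab
    · exact (w_kept .rbp rfl).trans ciReg
    · exact (w_kept .r15 rfl).trans effReg
  · -- 10DE32H without prep_huffman: only the return address of the check call was stored
    have htd : 1 ≤ td := by
      have hlt : u.mem.readLE (e.reg .rsp + 16) 4 < 2 ^ 32 := Mem.readLE_lt' _ _ _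
      rw [Vorbis.toInt_ofNat32 _ hlt, tdSlot] at hbr_10de0e
      have e0 : (0#32).toInt = 0 := by decide
      omega
    have hs : Mem.SameExcept (Seg2Wins (e.reg .rsp).toNat (fOf e)) u.mem s_10de2c.mem := by
      rw [w_mem]
      unfold Seg2Wins
      exact Mem.SameExcept.writeLE _ _ _ _ _ (by u_omega) ⟨_, List.mem_cons_self, by u_omega, by u_omega⟩
    have hab : abiInv s_10de2c := by
      refine Vorbis.abiInv_of ?_ ?_
      · rw [w_flags]
        simp only [X86.User.df_setStatus]
        exact w_df_10de20
      · rw [w_mxcsr]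
        exact hmx
    have hb : Bits Blk len u.mem (e.reg .rdi).toNat := hreader.bits
    have hk := Vorbis.Spec.Reader.store_off_obj hb (e.reg .rsp - 112) 8 1105445 (by u_omega) (by u_omega)
    rw [← w_mem] at hk
    refine ReachVia.done (Or.inr ⟨w_rip, ⟨?_, ⟨?_, ?_, ?_, ?_⟩, hinv, htd⟩⟩)
    · refine Common.carry_seg2 hcom g hs w_rsp ((w_kept .r12 rfl).trans hc) ?_ (hreader.trans hk.1) hab
      u_resolve
    · exact (w_kept .rbp rfl).trans ciReg
    · u_resolve
    · exact (w_kept .r15 rfl).trans effReg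
    · have r : s_10de2c.mem.readLE (e.reg .rsp + 16) 4 = u.mem.readLE (e.reg .rsp + 16) 4 :=
        seg2_read_arg g hs 16 4 (by omega)
      rw [r]
      exact tdSlot
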